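-- pv_equiv track=rewrite | github.com/Jonah-arm/maltese-falcon | 850.py | lineMatches
-- ===== SOURCE A (Python) =====
-- def noDiscrepencies(keyWord, dictWord, cipher):
--     for i in range(len(keyWord)):
--         if cipher.get(keyWord[i]) != dictWord[i]:
--             if cipher.get(keyWord[i]) != '*':
--                 return False
--             if dictWord[i] in cipher.values():
--                 return False
--
--     return True
--
-- def patternMatches(word1, word2):
--     if len(word1) != len(word2):
--         return False
--     mapping1 = {}
--     mapping2 = {}
--
--     for i in range(len(word1)):
--         mapping1.setdefault(word1[i],word2[i])
--         mapping2.setdefault(word2[i],word1[i])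
--         if(word1[i] != mapping2.get(word2[i]) or word2[i] != mapping1.get(word1[i])) :
--             return False
--
--     return True
--
-- def lineMatches(plainwords, words, cipher):
--     if len(words) != len(plainwords):
--         return False
--     for i in range(len(words)):
--         if patternMatches(words[i], plainwords[i]):
--             if noDiscrepencies(words[i],plainwords[i],cipher):
--                 for j in range(len(words[i])):
--                     cipher[words[i][j]] = plainwords[i][j]
--             else:
--                 return False
--         else:
--             return False
--
--     return True
-- ===== SOURCE B (Python) =====
-- def lineMatches(plainwords, words, cipher):
--     if len(words) != len(plainwords):
--         return False
--     for w, p in zip(words, plainwords):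
--         # pattern check: compare canonical first-occurrence-index forms
--         if [w.index(c) for c in w] != [p.index(c) for c in p]:
--             return False
--         # discrepancy check against the current cipher
--         vals = set(cipher.values())
--         if any(not (cipher.get(a) == b or (cipher.get(a) == '*' and b not in vals))
--                for a, b in zip(w, p)):
--             return False
--         cipher.update(zip(w, p))
--     return True
-- ===== Notes on version B (the rewrite author's own statement) =====
-- stated objective: idiomatic
-- what changed: patternMatches' incremental two-dict consistency scan with early exit is replaced by comparing the two words' canonical first-occurrence-index forms ([w.index(c) for c in w]), and the helper loops are folded into comprehension-style any()/update() over zipped pairs.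
import Mathlib
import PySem

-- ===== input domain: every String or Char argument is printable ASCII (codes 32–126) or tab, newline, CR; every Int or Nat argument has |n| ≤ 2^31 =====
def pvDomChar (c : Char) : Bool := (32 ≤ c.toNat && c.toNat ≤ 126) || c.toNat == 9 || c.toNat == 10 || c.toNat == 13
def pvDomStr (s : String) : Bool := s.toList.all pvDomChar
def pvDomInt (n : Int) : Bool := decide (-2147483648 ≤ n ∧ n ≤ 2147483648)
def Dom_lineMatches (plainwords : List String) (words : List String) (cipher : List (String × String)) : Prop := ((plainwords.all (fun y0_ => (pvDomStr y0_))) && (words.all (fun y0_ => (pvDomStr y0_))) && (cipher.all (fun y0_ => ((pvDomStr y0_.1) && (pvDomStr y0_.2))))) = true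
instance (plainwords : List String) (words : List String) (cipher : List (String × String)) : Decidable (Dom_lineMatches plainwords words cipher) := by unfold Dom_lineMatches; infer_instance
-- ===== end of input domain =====

-- B replaces A's incremental dual-dict pattern scan by comparing canonical first-occurrence
-- index forms (word.index per character) and folds the helpers into comprehension-style checks;
-- both Pythons mutate the caller's `cipher` dict identically, the theorems are about the return value.

-- ===== PORT A =====
-- noDiscrepencies: the i-loop over keyWord/dictWord (always called with equal lengths) as
-- recursion over the zipped character pairs; cipher is unchanged inside the loop.
def aNoDisc (cipher : PySem.Dict String String) : List (Char × Char) → Bool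
  | [] => true
  | (k, d) :: rest =>
    if cipher.get? (String.ofList [k]) != some (String.ofList [d]) then
      if cipher.get? (String.ofList [k]) != some "*" then false
      else if (cipher.values).contains (String.ofList [d]) then false
      else aNoDisc cipher rest
    else aNoDisc cipher rest

-- patternMatches' i-loop carrying the two setdefault dicts
def aPatGo : List (Char × Char) → PySem.Dict Char Char → PySem.Dict Char Char → Bool
  | [], _, _ => true
  | (a, b) :: rest, m1, m2 =>
    if (some a != (m2.setdefault b a).get? b) || (some b != (m1.setdefault a b).get? a) then false
    else aPatGo rest (m1.setdefault a b) (m2.setdefault b a)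

def aPatternMatches (w1 w2 : String) : Bool :=
  if w1.toList.length != w2.toList.length then false
  else aPatGo (w1.toList.zip w2.toList) PySem.Dict.empty PySem.Dict.empty

-- the j-loop 'cipher[words[i][j]] = plainwords[i][j]'
def aCipherWrite (cipher : PySem.Dict String String) (pairs : List (Char × Char)) : PySem.Dict String String :=
  pairs.foldl (fun d q => d.insert (String.ofList [q.1]) (String.ofList [q.2])) cipher

-- lineMatches' i-loop (words[i], plainwords[i] via zip; the length guard precedes it)
def aGo : List (String × String) → PySem.Dict String String → Bool
  | [], _ => true
  | (w, p) :: rest, cipher =>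
    if aPatternMatches w p then
      if aNoDisc cipher (w.toList.zip p.toList) then
        aGo rest (aCipherWrite cipher (w.toList.zip p.toList))
      else false
    else false

def lineMatches (plainwords : List String) (words : List String) (cipher : List (String × String)) : Bool :=
  if words.length != plainwords.length then false
  else aGo (words.zip plainwords) (PySem.Dict.ofList cipher)

-- ===== PORT B =====
-- [w.index(c) for c in w]
def bCanon (l : List Char) : List (Option Nat) := l.map (fun c => PySem.List.index? l c)

-- the generator's predicate inside any(...)
def bBad (cipher : PySem.Dict String String) (vals : PySem.Set String) (q : Char × Char) : Bool :=
  !(cipher.get? (String.ofList [q.1]) == some (String.ofList [q.2]) ||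
    (cipher.get? (String.ofList [q.1]) == some "*" && !(vals.contains (String.ofList [q.2]))))

-- the for w, p in zip(words, plainwords) loop
def bGo : List (String × String) → PySem.Dict String String → Bool
  | [], _ => true
  | (w, p) :: rest, cipher =>
    if bCanon w.toList != bCanon p.toList then false
    else
      let vals := PySem.Set.ofList cipher.values
      if (w.toList.zip p.toList).any (bBad cipher vals) then false
      else bGo rest (cipher.update ((w.toList.zip p.toList).map (fun q => (String.ofList [q.1], String.ofList [q.2]))))

def lineMatches_alt (plainwords : List String) (words : List String) (cipher : List (String × String)) : Bool :=
  if words.length != plainwords.length then false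
  else bGo (words.zip plainwords) (PySem.Dict.ofList cipher)

-- ===== PRECONDITION & SPEC =====
def Spec_lineMatches (plainwords : List String) (words : List String) (cipher : List (String × String)) (out : Bool) : Prop := out = lineMatches_alt plainwords words cipher
instance (plainwords : List String) (words : List String) (cipher : List (String × String)) (out : Bool) : Decidable (Spec_lineMatches plainwords words cipher out) := by unfold Spec_lineMatches; infer_instance

-- ===== CLAIM (what is proved, stated in full; the proofs are below) =====
def Claim_equal_lineMatches : Prop := ∀ (plainwords : List String) (words : List String) (cipher : List (String × String)), Dom_lineMatches plainwords words cipher → Spec_lineMatches plainwords words cipher (lineMatches plainwords words cipher)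

-- ===== LEMMAS AND PROOFS =====

-- value of the first pair of ps whose first (resp. second) component is x: what
-- mapping1/mapping2 hold after processing the prefix ps
def fvPair (ps : List (Char × Char)) (x : Char) : Option Char :=
  (ps.find? (fun q => q.1 == x)).map (·.2)
def fwPair (ps : List (Char × Char)) (x : Char) : Option Char :=
  (ps.find? (fun q => q.2 == x)).map (·.1)

-- pure-specification version of aPatGo: prefix processed so far is p
def okFrom (p : List (Char × Char)) : List (Char × Char) → Bool
  | [] => true
  | q :: r =>
    if fwPair (p ++ [q]) q.2 = some q.1 ∧ fvPair (p ++ [q]) q.1 = some q.2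
    then okFrom (p ++ [q]) r else false

theorem fvPair_snoc (p : List (Char × Char)) (q : Char × Char) (x : Char) :
    fvPair (p ++ [q]) x =
      if x = q.1 then some ((fvPair p q.1).getD q.2) else fvPair p x := by
  unfold fvPair
  rw [List.find?_append]
  by_cases h : x = q.1
  · rw [if_pos h, h]
    cases hf : p.find? (fun r => r.1 == q.1) with
    | none => simp [List.find?, Option.or]
    | some v => simp [Option.or]
  · have hne : (q.1 == x) = false := beq_eq_false_iff_ne.mpr (fun hq => h hq.symm)
    have hsing : (List.find? (fun r => r.1 == x) [q]) = none := by
      simp [List.find?, hne]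
    rw [hsing]
    simp [h]

theorem fwPair_snoc (p : List (Char × Char)) (q : Char × Char) (x : Char) :
    fwPair (p ++ [q]) x =
      if x = q.2 then some ((fwPair p q.2).getD q.1) else fwPair p x := by
  unfold fwPair
  rw [List.find?_append]
  by_cases h : x = q.2
  · rw [if_pos h, h]
    cases hf : p.find? (fun r => r.2 == q.2) with
    | none => simp [List.find?, Option.or]
    | some v => simp [Option.or]
  · have hne : (q.2 == x) = false := beq_eq_false_iff_ne.mpr (fun hq => h hq.symm)
    have hsing : (List.find? (fun r => r.2 == x) [q]) = none := by
      simp [List.find?, hne]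
    rw [hsing]
    simp [h]

theorem aPatGo_eq_okFrom (rest : List (Char × Char)) (p : List (Char × Char))
    (m1 m2 : PySem.Dict Char Char)
    (h1 : ∀ x, m1.get? x = fvPair p x) (h2 : ∀ x, m2.get? x = fwPair p x) :
    aPatGo rest m1 m2 = okFrom p rest := by
  induction rest generalizing p m1 m2 with
  | nil => rfl
  | cons q r ih =>
    obtain ⟨a, b⟩ := q
    have g1 : ∀ x, (m1.setdefault a b).get? x = fvPair (p ++ [(a, b)]) x := by
      intro x
      rw [fvPair_snoc]
      by_cases hx : x = a
      · subst hx
        simp [PySem.Dict.get?_setdefault_self, h1]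
      · rw [PySem.Dict.get?_setdefault_of_ne _ _ hx, if_neg hx, h1 x]
    have g2 : ∀ x, (m2.setdefault b a).get? x = fwPair (p ++ [(a, b)]) x := by
      intro x
      rw [fwPair_snoc]
      by_cases hx : x = b
      · subst hx
        simp [PySem.Dict.get?_setdefault_self, h2]
      · rw [PySem.Dict.get?_setdefault_of_ne _ _ hx, if_neg hx, h2 x]
    show aPatGo ((a, b) :: r) m1 m2 = okFrom p ((a, b) :: r)
    unfold aPatGo okFrom
    rw [g1 a, g2 b]
    by_cases hc : fwPair (p ++ [(a, b)]) (a, b).2 = some (a, b).1 ∧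
        fvPair (p ++ [(a, b)]) (a, b).1 = some (a, b).2
    · rw [if_pos hc]
      have e1 : (some a != fwPair (p ++ [(a, b)]) b) = false := by simp [hc.1]
      have e2 : (some b != fvPair (p ++ [(a, b)]) a) = false := by simp [hc.2]
      simp only [e1, e2, Bool.or_self]
      exact ih _ _ _ g1 g2
    · rw [if_neg hc]
      rcases not_and_or.mp hc with hbad | hbad
      · have : (some a != fwPair (p ++ [(a, b)]) b) = true := by
          simp; exact fun h => absurd h.symm hbad
        simp [this]
      · have : (some b != fvPair (p ++ [(a, b)]) a) = true := by
          simp; exact fun h => absurd h.symm hbad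
        simp [this]

theorem okFrom_true_iff (r : List (Char × Char)) (p : List (Char × Char)) :
    okFrom p r = true ↔
      ∀ i (hi : i < r.length),
        fwPair (p ++ r.take (i + 1)) (r[i].2) = some (r[i].1) ∧
        fvPair (p ++ r.take (i + 1)) (r[i].1) = some (r[i].2) := by
  induction r generalizing p with
  | nil => simp [okFrom]
  | cons q t ih =>
    unfold okFrom
    by_cases hc : fwPair (p ++ [q]) q.2 = some q.1 ∧ fvPair (p ++ [q]) q.1 = some q.2
    · rw [if_pos hc, ih]
      constructor
      · intro h i hi
        cases i with
        | zero => simpa using hc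
        | succ n =>
          have := h n (by simpa using hi)
          simpa [List.append_assoc] using this
      · intro h i hi
        have := h (i + 1) (by simpa using hi)
        simpa [List.append_assoc] using this
    · rw [if_neg hc]
      constructor
      · intro h
        exact absurd h Bool.false_ne_true
      · intro h
        exact absurd (by simpa using h 0 (by simp)) hc

theorem find?_take_eq {α : Type} (l : List α) (pr : α → Bool) (k i : Nat)
    (hik : i < k) (hi : i < l.length) (hp : pr l[i] = true) :
    (l.take k).find? pr = l.find? pr := by
  induction l generalizing k i with
  | nil => simp at hi
  | cons a t ih =>
    cases k with
    | zero => omega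
    | succ k' =>
      by_cases ha : pr a
      · simp [List.find?, ha]
      · cases i with
        | zero => simp_all
        | succ i' =>
          simp only [List.take_succ_cons, List.find?, ha]
          exact ih k' i' (by omega) (by simpa using hi) (by simpa using hp)

theorem fvPair_zip (l1 l2 : List Char) (c : Char) (hlen : l1.length = l2.length) :
    fvPair (l1.zip l2) c = (List.idxOf? c l1).bind (fun j => l2[j]?) := by
  induction l1 generalizing l2 with
  | nil => simp [fvPair]
  | cons a t1 ih =>
    cases l2 with
    | nil => simp at hlen
    | cons b t2 =>
      by_cases h : a = c
      · subst h
        simp [fvPair, List.idxOf?_cons]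
      · have : (a == c) = false := by simpa using h
        simp only [List.zip_cons_cons, fvPair, List.find?, this, List.idxOf?_cons]
        rw [← fvPair, ih t2 (by simpa using hlen)]
        cases List.idxOf? c t1 <;> simp

theorem fwPair_zip (l1 l2 : List Char) (c : Char) (hlen : l1.length = l2.length) :
    fwPair (l1.zip l2) c = (List.idxOf? c l2).bind (fun j => l1[j]?) := by
  induction l1 generalizing l2 with
  | nil =>
    cases l2 with
    | nil => simp [fwPair]
    | cons b t2 => simp at hlen
  | cons a t1 ih =>
    cases l2 with
    | nil => simp at hlen
    | cons b t2 =>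
      by_cases h : b = c
      · subst h
        simp [fwPair, List.idxOf?_cons]
      · have : (b == c) = false := by simpa using h
        simp only [List.zip_cons_cons, fwPair, List.find?, this, List.idxOf?_cons]
        rw [← fwPair, ih t2 (by simpa using hlen)]
        cases List.idxOf? c t2 <;> simp

-- pointwise correspondence: position i passes A's check iff its two first-occurrence
-- indices agree
theorem point_iff (l1 l2 : List Char) (hlen : l1.length = l2.length)
    (i : Nat) (hi1 : i < l1.length) (hi2 : i < l2.length) :
    ((List.idxOf? (l2[i]) l2).bind (fun j => l1[j]?) = some (l1[i]) ∧
     (List.idxOf? (l1[i]) l1).bind (fun j => l2[j]?) = some (l2[i]))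
    ↔ List.idxOf? (l1[i]) l1 = List.idxOf? (l2[i]) l2 := by
  obtain ⟨j, hj⟩ : ∃ j, List.idxOf? (l1[i]) l1 = some j := by
    cases h : List.idxOf? (l1[i]) l1 with
    | none => exact absurd (List.idxOf?_eq_none_iff.mp h) (by simp [List.getElem_mem])
    | some j => exact ⟨j, rfl⟩
  obtain ⟨k, hk⟩ : ∃ k, List.idxOf? (l2[i]) l2 = some k := by
    cases h : List.idxOf? (l2[i]) l2 with
    | none => exact absurd (List.idxOf?_eq_none_iff.mp h) (by simp [List.getElem_mem])
    | some k => exact ⟨k, rfl⟩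
  obtain ⟨hjlt, hjv, hjmin⟩ := List.idxOf?_eq_some_iff.mp hj
  obtain ⟨hklt, hkv, hkmin⟩ := List.idxOf?_eq_some_iff.mp hk
  rw [hj, hk]
  simp only [Option.bind_some]
  constructor
  · rintro ⟨h1, h2⟩
    have hkl1 : k < l1.length := by omega
    have hjl2 : j < l2.length := by omega
    rw [List.getElem?_eq_getElem hkl1] at h1
    rw [List.getElem?_eq_getElem hjl2] at h2
    have e1 : l1[k] = l1[i] := by simpa using h1
    have e2 : l2[j] = l2[i] := by simpa using h2
    have hjk : ¬ k < j := fun hlt => hjmin k hlt e1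
    have hkj : ¬ j < k := fun hlt => hkmin j hlt e2
    have : j = k := by omega
    simp [this]
  · intro h
    have hjk : j = k := by simpa using h
    subst hjk
    have hjl2 : j < l2.length := by omega
    refine ⟨?_, ?_⟩
    · rw [List.getElem?_eq_getElem hjlt]
      simp [hjv]
    · rw [List.getElem?_eq_getElem hjl2]
      simp [hkv]

theorem bCanon_eq_iff (l1 l2 : List Char) :
    bCanon l1 = bCanon l2 ↔
      l1.length = l2.length ∧
      ∀ i (hi1 : i < l1.length) (hi2 : i < l2.length),
        List.idxOf? (l1[i]) l1 = List.idxOf? (l2[i]) l2 := by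
  unfold bCanon
  constructor
  · intro h
    have hlen : l1.length = l2.length := by
      have := congrArg List.length h
      simpa using this
    refine ⟨hlen, fun i hi1 hi2 => ?_⟩
    have := congrArg (fun t => t[i]?) h
    simp only [List.getElem?_map] at this
    rw [List.getElem?_eq_getElem hi1, List.getElem?_eq_getElem hi2] at this
    simpa [PySem.List.index?_eq_idxOf?] using this
  · rintro ⟨hlen, h⟩
    apply List.ext_getElem (by simpa using hlen)
    intro i hi1 hi2
    simp only [List.getElem_map]
    have := h i (by simpa using hi1) (by simpa using hi2)
    simpa [PySem.List.index?_eq_idxOf?] using this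

theorem aPatternMatches_eq (w1 w2 : String) :
    aPatternMatches w1 w2 = (bCanon w1.toList == bCanon w2.toList) := by
  set l1 := w1.toList
  set l2 := w2.toList
  by_cases hlen : l1.length = l2.length
  · have hguard : (l1.length != l2.length) = false := by simp [hlen]
    unfold aPatternMatches
    rw [hguard]
    simp only [if_false, Bool.false_eq_true]
    have hok : aPatGo (l1.zip l2) PySem.Dict.empty PySem.Dict.empty = okFrom [] (l1.zip l2) := by
      apply aPatGo_eq_okFrom
      · intro x; simp [fvPair, PySem.Dict.get?_empty]
      · intro x; simp [fwPair, PySem.Dict.get?_empty]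
    rw [hok]
    rw [Bool.eq_iff_iff, okFrom_true_iff, beq_iff_eq, bCanon_eq_iff]
    have hzlen : (l1.zip l2).length = l1.length := by simp [hlen]
    constructor
    · intro h
      refine ⟨hlen, fun i hi1 hi2 => ?_⟩
      have hi : i < (l1.zip l2).length := by omega
      obtain ⟨c1, c2⟩ := h i hi
      rw [List.nil_append] at c1 c2
      have hg : (l1.zip l2)[i] = (l1[i], l2[i]) := List.getElem_zip
      rw [hg] at c1 c2
      have ht1 : ((l1.zip l2).take (i + 1)).find? (fun q => q.2 == l2[i]) =
          (l1.zip l2).find? (fun q => q.2 == l2[i]) := by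
        apply find?_take_eq _ _ _ i (by omega) hi
        rw [hg]; simp
      have ht2 : ((l1.zip l2).take (i + 1)).find? (fun q => q.1 == l1[i]) =
          (l1.zip l2).find? (fun q => q.1 == l1[i]) := by
        apply find?_take_eq _ _ _ i (by omega) hi
        rw [hg]; simp
      unfold fwPair at c1; unfold fvPair at c2
      rw [ht1] at c1; rw [ht2] at c2
      rw [← fwPair] at c1; rw [← fvPair] at c2
      rw [fwPair_zip _ _ _ hlen] at c1
      rw [fvPair_zip _ _ _ hlen] at c2
      exact (point_iff l1 l2 hlen i hi1 hi2).mp ⟨c1, c2⟩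
    · rintro ⟨_, h⟩ i hi
      have hi1 : i < l1.length := by omega
      have hi2 : i < l2.length := by omega
      have := (point_iff l1 l2 hlen i hi1 hi2).mpr (h i hi1 hi2)
      have hg : (l1.zip l2)[i] = (l1[i], l2[i]) := List.getElem_zip
      rw [List.nil_append, hg]
      have ht1 : ((l1.zip l2).take (i + 1)).find? (fun q => q.2 == (l1[i], l2[i]).2) =
          (l1.zip l2).find? (fun q => q.2 == l2[i]) := by
        apply find?_take_eq _ _ _ i (by omega) hi
        rw [hg]; simp
      have ht2 : ((l1.zip l2).take (i + 1)).find? (fun q => q.1 == (l1[i], l2[i]).1) =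
          (l1.zip l2).find? (fun q => q.1 == l1[i]) := by
        apply find?_take_eq _ _ _ i (by omega) hi
        rw [hg]; simp
      constructor
      · unfold fwPair
        rw [ht1, ← fwPair, fwPair_zip _ _ _ hlen]
        exact this.1
      · unfold fvPair
        rw [ht2, ← fvPair, fvPair_zip _ _ _ hlen]
        exact this.2
  · have hguard : (l1.length != l2.length) = true := by simpa using hlen
    unfold aPatternMatches
    rw [hguard]
    simp only [if_true]
    symm
    rw [beq_eq_false_iff_ne]
    intro h
    exact hlen ((bCanon_eq_iff l1 l2).mp h).1

theorem aNoDisc_eq (cipher : PySem.Dict String String) (pairs : List (Char × Char)) :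
    aNoDisc cipher pairs = !(pairs.any (bBad cipher (PySem.Set.ofList cipher.values))) := by
  induction pairs with
  | nil => rfl
  | cons q rest ih =>
    obtain ⟨k, d⟩ := q
    have hval : PySem.Set.contains (PySem.Set.ofList cipher.values) (String.ofList [d]) =
        (cipher.values).contains (String.ofList [d]) := by
      rw [Bool.eq_iff_iff]
      rw [PySem.Set.contains_iff]
      rw [PySem.Set.mem_ofList]
      simp
    simp only [aNoDisc, List.any_cons, bBad, hval, ih]
    cases h1 : cipher.get? (String.ofList [k]) == some (String.ofList [d]) <;>
      cases h2 : cipher.get? (String.ofList [k]) == some "*" <;>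
        cases h3 : (cipher.values).contains (String.ofList [d]) <;>
          simp_all [bne]

theorem aGo_eq_bGo (l : List (String × String)) (cipher : PySem.Dict String String) :
    aGo l cipher = bGo l cipher := by
  induction l generalizing cipher with
  | nil => rfl
  | cons q rest ih =>
    obtain ⟨w, p⟩ := q
    unfold aGo bGo
    rw [aPatternMatches_eq]
    have hupd : aCipherWrite cipher (w.toList.zip p.toList) =
        cipher.update ((w.toList.zip p.toList).map (fun q => (String.ofList [q.1], String.ofList [q.2]))) := by
      unfold aCipherWrite PySem.Dict.update
      rw [List.foldl_map]
    by_cases hpat : bCanon w.toList = bCanon p.toList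
    · have e1 : (bCanon w.toList == bCanon p.toList) = true := by simpa using hpat
      have e2 : (bCanon w.toList != bCanon p.toList) = false := by simpa using hpat
      rw [e1, e2]
      simp only [if_true, if_false, Bool.false_eq_true]
      rw [aNoDisc_eq]
      by_cases hbad : (w.toList.zip p.toList).any (bBad cipher (PySem.Set.ofList cipher.values))
      · simp [hbad]
      · have hb : ((w.toList.zip p.toList).any (bBad cipher (PySem.Set.ofList cipher.values))) = false := by
          simpa using hbad
        rw [hb]
        simp only [Bool.not_false, if_true]
        rw [hupd] at *
        simpa using ih _
    · have e1 : (bCanon w.toList == bCanon p.toList) = false := by simpa using hpat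
      have e2 : (bCanon w.toList != bCanon p.toList) = true := by simpa using hpat
      rw [e1, e2]
      simp

-- ===== VERDICT (by name: the statement is the Claim_ definition above) =====
theorem lineMatches_spec : Claim_equal_lineMatches := by
  intro plainwords words cipher _
  unfold Spec_lineMatches lineMatches lineMatches_alt
  by_cases h : words.length = plainwords.length
  · simp only [h, bne_self_eq_false, if_false, Bool.false_eq_true]
    exact aGo_eq_bGo _ _
  · have : (words.length != plainwords.length) = true := by simpa using h
    rw [this]
    simp
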